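-- pv_equiv track=rewrite | github.com/tudorhirtopanu/av-matchmaker | src/audio_processing/pipeline.py | get_speech_windows
-- ===== SOURCE A (Python) =====
-- def get_speech_windows(segments, max_gap_ms=700):
--     """
--     Merges consecutive speech segments into larger speech windows,
--     allowing short gaps (≤ max_gap_ms) between them.
--
--     :param segments: list of tuples
--         List of (start_ms, end_ms) speech segments.
--
--     :param max_gap_ms: int
--         Maximum gap (in milliseconds) allowed between segments to be merged.
--
--     :return: list of dict
--         Merged speech windows, each as a dict with "start" and "end" keys (in ms).
--     """
--     if not segments:
--         return []
--
--     merged = []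
--     current_start, current_end = segments[0]
--
--     for seg_start, seg_end in segments[1:]:
--         if seg_start - current_end <= max_gap_ms:
--             # Merge with current window
--             current_end = seg_end
--         else:
--             # Save current window as dict and start new
--             merged.append({"start": current_start, "end": current_end})
--             current_start, current_end = seg_start, seg_end
--
--     # Append final window
--     merged.append({"start": current_start, "end": current_end})
--     return merged
-- ===== SOURCE B (Python) =====
-- def get_speech_windows(segments, max_gap_ms=700):
--     """Span-based regrouping: outer loop emits one window per run of
--     close segments, inner loop consumes the run."""
--     windows = []
--     segs = list(segments)
--     while segs:
--         start, end = segs[0]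
--         rest = segs[1:]
--         while rest and rest[0][0] - end <= max_gap_ms:
--             end = rest[0][1]
--             rest = rest[1:]
--         windows.append({"start": start, "end": end})
--         segs = rest
--     return windows
-- ===== Notes on version B (the rewrite author's own statement) =====
-- stated objective: alternative
-- what changed: Replaces A's single stateful fold carrying (merged, current_start, current_end) by a two-level span decomposition: an outer loop that emits one window per iteration and an inner loop that consumes the whole run of gap-close segments for that window.
import Mathlib
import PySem

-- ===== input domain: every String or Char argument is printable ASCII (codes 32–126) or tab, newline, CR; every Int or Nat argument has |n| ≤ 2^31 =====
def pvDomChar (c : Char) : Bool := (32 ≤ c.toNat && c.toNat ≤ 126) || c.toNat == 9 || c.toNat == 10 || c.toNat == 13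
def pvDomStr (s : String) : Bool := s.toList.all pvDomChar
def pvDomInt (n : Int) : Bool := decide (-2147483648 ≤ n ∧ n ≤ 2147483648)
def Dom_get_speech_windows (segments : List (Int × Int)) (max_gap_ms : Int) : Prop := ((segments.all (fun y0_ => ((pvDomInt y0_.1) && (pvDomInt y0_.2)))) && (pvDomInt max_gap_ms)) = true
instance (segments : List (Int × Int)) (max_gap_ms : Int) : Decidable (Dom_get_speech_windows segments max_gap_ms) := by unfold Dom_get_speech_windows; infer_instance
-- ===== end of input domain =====

-- B replaces A's single stateful accumulating fold by a two-level span decomposition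
-- (outer loop per emitted window, inner loop consuming a run of gap-close segments);
-- same values, alternative structure, no speed claim.

-- ===== PORT A =====
-- literal transliteration of A: fold over segments[1:] carrying (merged, current_start, current_end);
-- pvStepA is the body of A's for-loop.
def pvStepA (max_gap_ms : Int) (st : List (List (String × Int)) × Int × Int) (seg : Int × Int) :
    List (List (String × Int)) × Int × Int :=
  let (merged, current_start, current_end) := st
  if seg.1 - current_end ≤ max_gap_ms then
    (merged, current_start, seg.2)
  else
    (merged ++ [[("start", current_start), ("end", current_end)]], seg.1, seg.2)

def get_speech_windows (segments : List (Int × Int)) (max_gap_ms : Int) : List (List (String × Int)) :=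
  match segments with
  | [] => []
  | (s0, e0) :: rest =>
    let st := rest.foldl (pvStepA max_gap_ms) ([], s0, e0)
    st.1 ++ [[("start", st.2.1), ("end", st.2.2)]]

-- ===== PORT B =====
-- inner while loop of Source B: consume the run of segments within max_gap_ms of the current end
def pvConsume (max_gap_ms : Int) (e : Int) (rest : List (Int × Int)) : Int × List (Int × Int) :=
  match rest with
  | [] => (e, [])
  | (s2, e2) :: r => if s2 - e ≤ max_gap_ms then pvConsume max_gap_ms e2 r else (e, (s2, e2) :: r)

theorem pvConsume_length (max_gap_ms e : Int) (rest : List (Int × Int)) :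
    (pvConsume max_gap_ms e rest).2.length ≤ rest.length := by
  induction rest generalizing e with
  | nil => simp [pvConsume]
  | cons p r ih =>
    simp only [pvConsume]
    split
    · exact le_trans (ih p.2) (Nat.le_succ _)
    · simp

-- outer while loop of Source B: one window per run
def get_speech_windows_alt (segments : List (Int × Int)) (max_gap_ms : Int) : List (List (String × Int)) :=
  match segments with
  | [] => []
  | (s, e) :: rest =>
    let c := pvConsume max_gap_ms e rest
    [("start", s), ("end", c.1)] :: get_speech_windows_alt c.2 max_gap_ms
termination_by segments.length
decreasing_by
  simp only [List.length_cons]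
  exact Nat.lt_succ_of_le (pvConsume_length max_gap_ms e rest)

-- ===== PRECONDITION & SPEC =====
def Spec_get_speech_windows (segments : List (Int × Int)) (max_gap_ms : Int) (out : List (List (String × Int))) : Prop := out = get_speech_windows_alt segments max_gap_ms
instance (segments : List (Int × Int)) (max_gap_ms : Int) (out : List (List (String × Int))) : Decidable (Spec_get_speech_windows segments max_gap_ms out) := by unfold Spec_get_speech_windows; infer_instance

-- ===== CLAIM (what is proved, stated in full; the proofs are below) =====
def Claim_equal_get_speech_windows : Prop := ∀ (segments : List (Int × Int)) (max_gap_ms : Int), Dom_get_speech_windows segments max_gap_ms → Spec_get_speech_windows segments max_gap_ms (get_speech_windows segments max_gap_ms)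

-- ===== LEMMAS AND PROOFS =====

-- A's fold, finished by appending the final window, equals acc ++ B's windows for the
-- current state (cs, ce) and remaining segments.
theorem pv_key (max_gap_ms : Int) :
    ∀ (rest : List (Int × Int)) (acc : List (List (String × Int))) (cs ce : Int),
      (let st := rest.foldl (pvStepA max_gap_ms) (acc, cs, ce)
       st.1 ++ [[("start", st.2.1), ("end", st.2.2)]])
      = acc ++ ([("start", cs), ("end", (pvConsume max_gap_ms ce rest).1)]
                 :: get_speech_windows_alt (pvConsume max_gap_ms ce rest).2 max_gap_ms) := by
  intro rest
  induction rest with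
  | nil => intro acc cs ce; simp [pvConsume, get_speech_windows_alt]
  | cons p r ih =>
    intro acc cs ce
    obtain ⟨s2, e2⟩ := p
    by_cases h : s2 - ce ≤ max_gap_ms
    · have h' : s2 ≤ max_gap_ms + ce := by omega
      simpa [pvStepA, pvConsume, h'] using ih acc cs e2
    · have h' : ¬ s2 ≤ max_gap_ms + ce := by omega
      rw [List.foldl_cons]
      have hs : pvStepA max_gap_ms (acc, cs, ce) (s2, e2)
          = (acc ++ [[("start", cs), ("end", ce)]], s2, e2) := by
        simp [pvStepA, h']
      rw [hs, ih (acc ++ [[("start", cs), ("end", ce)]]) s2 e2]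
      have hc : pvConsume max_gap_ms ce ((s2, e2) :: r) = (ce, (s2, e2) :: r) := by
        simp [pvConsume, h']
      rw [hc]
      simp [get_speech_windows_alt]

-- ===== VERDICT (by name: the statement is the Claim_ definition above) =====
theorem get_speech_windows_spec : Claim_equal_get_speech_windows := by
  intro segments max_gap_ms _
  unfold Spec_get_speech_windows
  match segments with
  | [] => simp [get_speech_windows, get_speech_windows_alt]
  | (s0, e0) :: rest =>
    simpa [get_speech_windows, get_speech_windows_alt] using pv_key max_gap_ms rest [] s0 e0
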